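-- pv_equiv track=rewrite | github.com/Ivanxiedata/GenAI-Review-Optimizer | reviewPath.py | review_sort_path
-- ===== SOURCE A (Python) =====
-- def dfs(graph, start, curr_path, all_paths, visited):
--     # Add the current node to the path
--     curr_path.append(start)
--
--     # Mark the current node as visited
--     visited.add(start)
--
--     # If the current node has no neighbors or all neighbors are visited, it's a leaf node, so save the path
--     if not graph[start] or all(child in visited for child in graph[start]):
--         all_paths.append(curr_path.copy())
--     else:
--         # Recur for all unvisited neighbors of the current node
--         for child in graph[start]:
--             if child not in visited:
--                 dfs(graph, child, curr_path, all_paths, visited)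
--
--     # Backtrack: remove the current node from the path
--     curr_path.pop()
--
-- def review_sort_path(graph):
--     all_paths = []
--     visited = set()
--
--     # Start DFS from each node to explore all paths
--     for start_node in graph:
--         if start_node not in visited:
--             curr_path = []
--             dfs(graph, start_node, curr_path, all_paths, visited)
--
--     return all_paths
-- ===== SOURCE B (Python) =====
-- def review_sort_path(graph):
--     all_paths = []
--     visited = set()
--
--     def enter(node, path):
--         # Mark node visited, extend the path, and record it if it is a dead end
--         # (no children, or every child already visited) at the moment of entry.
--         visited.add(node)
--         path.append(node)
--         children = graph[node]
--         if not children or all(c in visited for c in children):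
--             all_paths.append(path.copy())
--         return list(children)
--
--     for root in graph:
--         if root in visited:
--             continue
--         path = []
--         stack = [enter(root, path)]  # one pending-children list per open node
--         while stack:
--             rest = stack[-1]
--             while rest and rest[0] in visited:
--                 rest.pop(0)
--             if rest:
--                 stack.append(enter(rest.pop(0), path))
--             else:
--                 stack.pop()
--                 path.pop()
--     return all_paths
-- ===== Notes on version B (the rewrite author's own statement) =====
-- stated objective: alternative
-- what changed: The recursive DFS helper with shared mutable state is replaced by an iterative traversal keeping an explicit stack of pending-children lists, with a single enter() step doing the visit/leaf-check and explicit pop-backtracking instead of recursion.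
-- outside the precondition, e.g. on review_sort_path({'a': ['x']}): A raises KeyError, B raises KeyError
import Mathlib
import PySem

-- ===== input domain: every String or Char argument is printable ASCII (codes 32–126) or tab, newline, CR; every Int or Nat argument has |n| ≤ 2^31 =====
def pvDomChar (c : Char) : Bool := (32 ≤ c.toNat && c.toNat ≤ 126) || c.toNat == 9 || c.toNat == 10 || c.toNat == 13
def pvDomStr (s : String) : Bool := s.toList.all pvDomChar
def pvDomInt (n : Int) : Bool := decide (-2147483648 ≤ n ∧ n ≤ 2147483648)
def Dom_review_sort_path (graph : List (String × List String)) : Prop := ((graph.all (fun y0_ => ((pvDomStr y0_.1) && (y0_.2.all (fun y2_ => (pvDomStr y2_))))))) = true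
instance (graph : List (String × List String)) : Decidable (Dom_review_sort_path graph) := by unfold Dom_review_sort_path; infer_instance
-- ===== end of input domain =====

-- B replaces A's recursive DFS helper by an iterative traversal with an explicit stack of
-- pending-children lists (objective: alternative decomposition, same asymptotic cost).
-- A mutates curr_path/visited in place in Python; the equivalence proved here is about the
-- return value (both ports thread that state as values).

-- ===== PORT A =====
-- dfs(graph, start, curr_path, all_paths, visited): curr_path.append(start) … curr_path.pop()
-- cancel out, so the port passes path ++ [start] to the body and returns (all_paths, visited).
-- The for-loop over graph[start] is the foldl.  fuel: one unit per nesting level; each level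
-- enters a node not yet visited, so graph.length + 1 (supplied below) never runs out on Pre_.
def pvDfsA (g : List (String × List String)) (fuel : Nat) (start : String) (path : List String)
    (paths : List (List String)) (vis : PySem.Set String) :
    List (List String) × PySem.Set String :=
  match fuel with
  | 0 => (paths, vis)
  | fuel + 1 =>
    let curr := path ++ [start]
    let vis' := PySem.Set.add vis start
    let ns := ((PySem.Dict.mk g).get? start).getD []   -- graph[start]; Pre_ keeps every entered node a key
    if ns.isEmpty || ns.all (fun c => PySem.Set.contains vis' c) then
      (paths ++ [curr], vis')
    else
      ns.foldl (fun st c =>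
        if PySem.Set.contains st.2 c then st
        else pvDfsA g fuel c curr st.1 st.2) (paths, vis')
termination_by fuel

def review_sort_path (graph : List (String × List String)) : List (List String) :=
  (graph.foldl
    (fun st kv =>
      if PySem.Set.contains st.2 kv.1 then st
      else pvDfsA graph (graph.length + 1) kv.1 [] st.1 st.2)
    ([], PySem.Set.empty)).1

-- ===== PORT B =====
-- enter(node, path): mark visited, extend path, record the path if node is a dead end at entry,
-- and hand back the pending-children list for the new stack frame.
def pvEnterB (g : List (String × List String)) (node : String) (path : List String)
    (paths : List (List String)) (vis : PySem.Set String) :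
    List String × List String × List (List String) × PySem.Set String :=
  let vis' := PySem.Set.add vis node
  let path' := path ++ [node]
  let children := ((PySem.Dict.mk g).get? node).getD []
  let paths' := if children.isEmpty || children.all (fun c => PySem.Set.contains vis' c) then
      paths ++ [path'] else paths
  (children, path', paths', vis')

-- while stack: … — stack holds one pending-children list per open node; fuel is consumed only
-- when a new node is pushed (never reached from review_sort_path_alt's graph.length + 1).
def pvRunB (g : List (String × List String)) (fuel : Nat) (stack : List (List String))
    (path : List String) (paths : List (List String)) (vis : PySem.Set String) :
    List (List String) × PySem.Set String :=
  match stack with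
  | [] => (paths, vis)
  | rest :: frames =>
    match rest with
    | [] => pvRunB g fuel frames path.dropLast paths vis            -- stack.pop(); path.pop()
    | c :: rest' =>
      if PySem.Set.contains vis c then
        pvRunB g fuel (rest' :: frames) path paths vis              -- drop an already-visited child
      else
        match fuel with
        | 0 => (paths, vis)                                         -- fuel guard, unreachable
        | fuel' + 1 =>
          let e := pvEnterB g c path paths vis
          pvRunB g fuel' (e.1 :: rest' :: frames) e.2.1 e.2.2.1 e.2.2.2
termination_by (fuel, (stack.map (fun r => r.length + 1)).sum)

def review_sort_path_alt (graph : List (String × List String)) : List (List String) :=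
  (graph.foldl
    (fun st kv =>
      if PySem.Set.contains st.2 kv.1 then st
      else
        let e := pvEnterB graph kv.1 [] st.1 st.2
        pvRunB graph (graph.length + 1) [e.1] e.2.1 e.2.2.1 e.2.2.2)
    ([], PySem.Set.empty)).1

-- ===== PRECONDITION & SPEC =====
-- Pre_ excludes (i) graphs in which some listed child is not itself a key — there Python's
-- graph[child] raises KeyError (the outer loop reaches every key, so every non-key child is hit) —
-- and (ii) association lists with duplicate keys, which a Python dict argument cannot represent
-- (the assoc-list model's behaviour there is accidental).
def Pre_review_sort_path (graph : List (String × List String)) : Prop :=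
  (graph.map Prod.fst).Nodup ∧ ∀ p ∈ graph, ∀ c ∈ p.2, c ∈ graph.map Prod.fst
instance (graph : List (String × List String)) : Decidable (Pre_review_sort_path graph) := by
  unfold Pre_review_sort_path; infer_instance

def pvWitness_review_sort_path : (List (String × List String)) :=
  [("a", ["b", "c"]), ("b", ["c"]), ("c", [])]

def Spec_review_sort_path (graph : List (String × List String)) (out : List (List String)) : Prop := out = review_sort_path_alt graph
instance (graph : List (String × List String)) (out : List (List String)) : Decidable (Spec_review_sort_path graph out) := by unfold Spec_review_sort_path; infer_instance

-- ===== CLAIM (what is proved, stated in full; the proofs are below) =====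
def Claim_equal_review_sort_path : Prop := ∀ (graph : List (String × List String)), Dom_review_sort_path graph → Pre_review_sort_path graph → Spec_review_sort_path graph (review_sort_path graph)

-- ===== LEMMAS AND PROOFS =====

def pvKeys (g : List (String × List String)) : List String := g.map Prod.fst

-- A's child-loop as a named function of the loop state (pvDfsA's foldl, unchanged).
def pvLoopA (g : List (String × List String)) (fuel : Nat) (rest : List String)
    (curr : List String) (st : List (List String) × PySem.Set String) :
    List (List String) × PySem.Set String :=
  rest.foldl (fun st c =>
    if PySem.Set.contains st.2 c then st
    else pvDfsA g fuel c curr st.1 st.2) st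

-- number of keys not yet visited: the quantity both fuels dominate
def pvUncov (g : List (String × List String)) (vis : PySem.Set String) : Nat :=
  ((pvKeys g).toFinset.filter (fun x => x ∉ vis)).card

-- basic uncov lemmas
theorem pvUncov_mono (g : List (String × List String)) (vis vis' : PySem.Set String)
    (h : ∀ x, x ∈ vis → x ∈ vis') : pvUncov g vis' ≤ pvUncov g vis := by
  apply Finset.card_le_card
  intro x hx
  simp only [Finset.mem_filter] at *
  exact ⟨hx.1, fun hm => hx.2 (h x hm)⟩

theorem pvMem_add_self (s : PySem.Set String) (x : String) : x ∈ s.add x :=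
  (PySem.Set.mem_add s x x).mpr (Or.inr rfl)

theorem pvSubset_add (s : PySem.Set String) (x : String) : ∀ y, y ∈ s → y ∈ s.add x :=
  fun y hy => (PySem.Set.mem_add s x y).mpr (Or.inl hy)

theorem pvUncov_add_lt (g : List (String × List String)) (vis : PySem.Set String) (c : String)
    (hk : c ∈ pvKeys g) (hc : c ∉ vis) : pvUncov g (vis.add c) < pvUncov g vis := by
  apply Finset.card_lt_card
  constructor
  · intro x hx
    simp only [Finset.mem_filter] at *
    exact ⟨hx.1, fun hm => hx.2 (pvSubset_add vis c x hm)⟩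
  · intro hsub
    have := hsub (by simp only [Finset.mem_filter]; exact ⟨List.mem_toFinset.mpr hk, hc⟩)
    simp only [Finset.mem_filter] at this
    exact this.2 (pvMem_add_self vis c)

theorem pvUncov_pos (g : List (String × List String)) (vis : PySem.Set String) (c : String)
    (hk : c ∈ pvKeys g) (hc : c ∉ vis) : 1 ≤ pvUncov g vis := by
  apply Finset.card_pos.mpr
  exact ⟨c, by simp only [Finset.mem_filter]; exact ⟨List.mem_toFinset.mpr hk, hc⟩⟩

theorem pvUncov_le_len (g : List (String × List String)) (vis : PySem.Set String) :
    pvUncov g vis ≤ g.length := by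
  calc pvUncov g vis ≤ (pvKeys g).toFinset.card := Finset.card_filter_le _ _
    _ ≤ (pvKeys g).length := List.toFinset_card_le _
    _ = g.length := by simp [pvKeys]

theorem pvGet_mem (g : List (String × List String)) (n : String) (cs : List String)
    (h : (PySem.Dict.mk g).get? n = some cs) : ∃ k, (k, cs) ∈ g := by
  induction g with
  | nil => simp [PySem.Dict.get?] at h
  | cons p rest ih =>
    rw [PySem.Dict.get?_mk_cons] at h
    by_cases hp : (p.1 == n) = true
    · simp [hp] at h
      exact ⟨p.1, by simp [← h]⟩
    · simp [hp] at h
      obtain ⟨k, hk⟩ := ih h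
      exact ⟨k, List.mem_cons_of_mem _ hk⟩

theorem pvChildren_subset (g : List (String × List String))
    (hg : ∀ p ∈ g, ∀ c ∈ p.2, c ∈ pvKeys g) (n : String) :
    ∀ c ∈ ((PySem.Dict.mk g).get? n).getD [], c ∈ pvKeys g := by
  intro c hc
  cases h : (PySem.Dict.mk g).get? n with
  | none => rw [h] at hc; simp at hc
  | some cs =>
    rw [h] at hc
    obtain ⟨k, hk⟩ := pvGet_mem g n cs h
    exact hg (k, cs) hk c (by simpa using hc)

-- unfolding lemmas
theorem pvLoopA_nil (g : List (String × List String)) (fuel : Nat) (curr : List String)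
    (st : List (List String) × PySem.Set String) : pvLoopA g fuel [] curr st = st := rfl

theorem pvLoopA_cons (g : List (String × List String)) (fuel : Nat) (c : String)
    (rest : List String) (curr : List String) (st : List (List String) × PySem.Set String) :
    pvLoopA g fuel (c :: rest) curr st =
      pvLoopA g fuel rest curr
        (if PySem.Set.contains st.2 c then st else pvDfsA g fuel c curr st.1 st.2) := rfl

theorem pvDfsA_zero (g : List (String × List String)) (start : String) (path : List String)
    (paths : List (List String)) (vis : PySem.Set String) :
    pvDfsA g 0 start path paths vis = (paths, vis) := by
  rw [pvDfsA]

theorem pvLoopA_all_visited (g : List (String × List String)) (fuel : Nat) :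
    ∀ (rest : List String) (curr : List String) (st : List (List String) × PySem.Set String),
    (∀ c ∈ rest, c ∈ st.2) → pvLoopA g fuel rest curr st = st := by
  intro rest
  induction rest with
  | nil => intro curr st _; rfl
  | cons c rest ih =>
    intro curr st h
    rw [pvLoopA_cons]
    have hc : PySem.Set.contains st.2 c = true :=
      (PySem.Set.contains_iff st.2 c).mpr (h c (by simp))
    rw [if_pos hc]
    exact ih curr st (fun d hd => h d (List.mem_cons_of_mem _ hd))

theorem pvDfsA_succ (g : List (String × List String)) (fuel : Nat) (start : String)
    (path : List String) (paths : List (List String)) (vis : PySem.Set String) :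
    pvDfsA g (fuel + 1) start path paths vis =
      pvLoopA g fuel (pvEnterB g start path paths vis).1 (pvEnterB g start path paths vis).2.1
        ((pvEnterB g start path paths vis).2.2.1, (pvEnterB g start path paths vis).2.2.2) := by
  rw [pvDfsA]
  simp only [pvEnterB]
  set ns := ((PySem.Dict.mk g).get? start).getD [] with hns
  by_cases h : (ns.isEmpty || ns.all (fun c => PySem.Set.contains (vis.add start) c)) = true
  · rw [if_pos h, if_pos h]
    rw [pvLoopA_all_visited]
    intro c hc
    rcases Bool.or_eq_true_iff.mp h with h1 | h1
    · rw [List.isEmpty_iff.mp h1] at hc; simp at hc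
    · exact (PySem.Set.contains_iff _ c).mp (List.all_eq_true.mp h1 c hc)
  · rw [if_neg h, if_neg h]
    rfl

-- visited only grows
theorem pvLoopA_vis_mono_of (g : List (String × List String)) (fuel : Nat)
    (hdfs : ∀ n path paths vis x, x ∈ vis → x ∈ (pvDfsA g fuel n path paths vis).2) :
    ∀ (rest curr : List String) (st : List (List String) × PySem.Set String) (x : String),
      x ∈ st.2 → x ∈ (pvLoopA g fuel rest curr st).2 := by
  intro rest
  induction rest with
  | nil => intro curr st x hx; exact hx
  | cons c rest ih =>
    intro curr st x hx
    rw [pvLoopA_cons]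
    by_cases hc : PySem.Set.contains st.2 c = true
    · rw [if_pos hc]; exact ih curr st x hx
    · rw [if_neg hc]
      exact ih curr _ x (hdfs c curr st.1 st.2 x hx)

theorem pvDfsA_vis_mono (g : List (String × List String)) :
    ∀ (fuel : Nat) (n : String) (path : List String) (paths : List (List String))
      (vis : PySem.Set String) (x : String), x ∈ vis → x ∈ (pvDfsA g fuel n path paths vis).2 := by
  intro fuel
  induction fuel with
  | zero => intro n path paths vis x hx; rw [pvDfsA_zero]; exact hx
  | succ fuel ih =>
    intro n path paths vis x hx
    rw [pvDfsA_succ]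
    exact pvLoopA_vis_mono_of g fuel ih _ _ _ x (pvSubset_add vis n x hx)

theorem pvLoopA_vis_mono (g : List (String × List String)) (fuel : Nat) :
    ∀ (rest curr : List String) (st : List (List String) × PySem.Set String) (x : String),
      x ∈ st.2 → x ∈ (pvLoopA g fuel rest curr st).2 :=
  pvLoopA_vis_mono_of g fuel (pvDfsA_vis_mono g fuel)

-- fuel indifference for A's dfs/loop
theorem pvLoopA_fuel_congr_of (g : List (String × List String)) (fuel1 fuel2 : Nat)
    (hdfs : ∀ n path paths vis, n ∈ pvKeys g → n ∉ vis →
      pvUncov g vis ≤ fuel1 → pvUncov g vis ≤ fuel2 →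
      pvDfsA g fuel1 n path paths vis = pvDfsA g fuel2 n path paths vis) :
    ∀ (rest curr : List String) (st : List (List String) × PySem.Set String),
      (∀ c ∈ rest, c ∈ pvKeys g) →
      pvUncov g st.2 ≤ fuel1 → pvUncov g st.2 ≤ fuel2 →
      pvLoopA g fuel1 rest curr st = pvLoopA g fuel2 rest curr st := by
  intro rest
  induction rest with
  | nil => intro curr st _ _ _; rfl
  | cons c rest ih =>
    intro curr st hr h1 h2
    rw [pvLoopA_cons, pvLoopA_cons]
    by_cases hc : PySem.Set.contains st.2 c = true
    · rw [if_pos hc, if_pos hc]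
      exact ih curr st (fun d hd => hr d (List.mem_cons_of_mem _ hd)) h1 h2
    · rw [if_neg hc, if_neg hc]
      have hcm : c ∉ st.2 := fun hm => hc ((PySem.Set.contains_iff st.2 c).mpr hm)
      have hck : c ∈ pvKeys g := hr c (by simp)
      rw [hdfs c curr st.1 st.2 hck hcm h1 h2]
      have hmono := pvUncov_mono g st.2 (pvDfsA g fuel2 c curr st.1 st.2).2
        (fun x hx => pvDfsA_vis_mono g fuel2 c curr st.1 st.2 x hx)
      exact ih curr _ (fun d hd => hr d (List.mem_cons_of_mem _ hd))
        (le_trans hmono h1) (le_trans hmono h2)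

theorem pvDfsA_fuel_congr (g : List (String × List String))
    (hg : ∀ p ∈ g, ∀ c ∈ p.2, c ∈ pvKeys g) :
    ∀ (fuel1 fuel2 : Nat) (n : String) (path : List String) (paths : List (List String))
      (vis : PySem.Set String), n ∈ pvKeys g → n ∉ vis →
      pvUncov g vis ≤ fuel1 → pvUncov g vis ≤ fuel2 →
      pvDfsA g fuel1 n path paths vis = pvDfsA g fuel2 n path paths vis := by
  intro fuel1
  induction fuel1 using Nat.strong_induction_on with
  | _ fuel1 IH =>
    intro fuel2 n path paths vis hk hnv h1 h2
    have hpos : 1 ≤ pvUncov g vis := pvUncov_pos g vis n hk hnv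
    match fuel1, fuel2 with
    | 0, _ => omega
    | _ + 1, 0 => omega
    | a + 1, b + 1 =>
      rw [pvDfsA_succ, pvDfsA_succ]
      apply pvLoopA_fuel_congr_of g a b
      · intro m path' paths' vis' hmk hmv hm1 hm2
        exact IH a (by omega) b m path' paths' vis' hmk hmv hm1 hm2
      · exact pvChildren_subset g hg n
      · simp only [pvEnterB]
        have := pvUncov_add_lt g vis n hk hnv
        omega
      · simp only [pvEnterB]
        have := pvUncov_add_lt g vis n hk hnv
        omega

theorem pvLoopA_fuel_congr (g : List (String × List String))
    (hg : ∀ p ∈ g, ∀ c ∈ p.2, c ∈ pvKeys g) (fuel1 fuel2 : Nat) :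
    ∀ (rest curr : List String) (st : List (List String) × PySem.Set String),
      (∀ c ∈ rest, c ∈ pvKeys g) →
      pvUncov g st.2 ≤ fuel1 → pvUncov g st.2 ≤ fuel2 →
      pvLoopA g fuel1 rest curr st = pvLoopA g fuel2 rest curr st :=
  pvLoopA_fuel_congr_of g fuel1 fuel2
    (fun n path paths vis => pvDfsA_fuel_congr g hg fuel1 fuel2 n path paths vis)

-- unfolding lemmas for the stack machine
theorem pvRunB_nil (g : List (String × List String)) (fuel : Nat) (path : List String)
    (paths : List (List String)) (vis : PySem.Set String) :
    pvRunB g fuel [] path paths vis = (paths, vis) := by rw [pvRunB]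

theorem pvRunB_pop (g : List (String × List String)) (fuel : Nat) (frames : List (List String))
    (path : List String) (paths : List (List String)) (vis : PySem.Set String) :
    pvRunB g fuel ([] :: frames) path paths vis =
      pvRunB g fuel frames path.dropLast paths vis := by rw [pvRunB.eq_def]

theorem pvRunB_skip (g : List (String × List String)) (fuel : Nat) (c : String)
    (rest' : List String) (frames : List (List String)) (path : List String)
    (paths : List (List String)) (vis : PySem.Set String) (hc : c ∈ vis) :
    pvRunB g fuel ((c :: rest') :: frames) path paths vis =
      pvRunB g fuel (rest' :: frames) path paths vis := by
  rw [pvRunB.eq_def]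
  simp only [if_pos ((PySem.Set.contains_iff vis c).mpr hc)]

theorem pvRunB_push (g : List (String × List String)) (fuel : Nat) (c : String)
    (rest' : List String) (frames : List (List String)) (path : List String)
    (paths : List (List String)) (vis : PySem.Set String) (hc : c ∉ vis) :
    pvRunB g (fuel + 1) ((c :: rest') :: frames) path paths vis =
      pvRunB g fuel ((pvEnterB g c path paths vis).1 :: rest' :: frames)
        (pvEnterB g c path paths vis).2.1 (pvEnterB g c path paths vis).2.2.1
        (pvEnterB g c path paths vis).2.2.2 := by
  rw [pvRunB.eq_def]
  simp only [if_neg (fun h => hc ((PySem.Set.contains_iff vis c).mp h))]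

theorem pvStackOK_tail {g : List (String × List String)} {c : String} {rest' : List String}
    {frames : List (List String)}
    (hs : ∀ r ∈ (c :: rest') :: frames, ∀ d ∈ r, d ∈ pvKeys g) :
    ∀ r ∈ rest' :: frames, ∀ d ∈ r, d ∈ pvKeys g := by
  intro r hr d hd
  rcases List.mem_cons.mp hr with h | h
  · exact hs (c :: rest') (by simp) d (by rw [h] at hd; exact List.mem_cons_of_mem _ hd)
  · exact hs r (List.mem_cons_of_mem _ h) d hd

theorem pvStackOK_push {g : List (String × List String)} {cs : List String}
    {stack : List (List String)}
    (hs : ∀ r ∈ stack, ∀ d ∈ r, d ∈ pvKeys g)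
    (hcs : ∀ d ∈ cs, d ∈ pvKeys g) :
    ∀ r ∈ cs :: stack, ∀ d ∈ r, d ∈ pvKeys g := by
  intro r hr d hd
  rcases List.mem_cons.mp hr with h | h
  · exact hcs d (by rwa [h] at hd)
  · exact hs r h d hd

-- fuel indifference for the stack machine
theorem pvRunB_fuel_congr (g : List (String × List String))
    (hg : ∀ p ∈ g, ∀ c ∈ p.2, c ∈ pvKeys g) :
    ∀ (fuel1 fuel2 : Nat) (stack : List (List String)) (path : List String)
      (paths : List (List String)) (vis : PySem.Set String),
      (∀ r ∈ stack, ∀ c ∈ r, c ∈ pvKeys g) →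
      pvUncov g vis ≤ fuel1 → pvUncov g vis ≤ fuel2 →
      pvRunB g fuel1 stack path paths vis = pvRunB g fuel2 stack path paths vis := by
  intro fuel1
  induction fuel1 using Nat.strong_induction_on with
  | _ fuel1 IH =>
    intro fuel2 stack
    induction stack with
    | nil => intro path paths vis _ _ _; rw [pvRunB_nil, pvRunB_nil]
    | cons rest frames IHs =>
      induction rest with
      | nil =>
        intro path paths vis hs h1 h2
        rw [pvRunB_pop, pvRunB_pop]
        exact IHs _ _ _ (fun r hr => hs r (List.mem_cons_of_mem _ hr)) h1 h2
      | cons c rest' IHr =>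
        intro path paths vis hs h1 h2
        by_cases hc : c ∈ vis
        · rw [pvRunB_skip _ _ _ _ _ _ _ _ hc, pvRunB_skip _ _ _ _ _ _ _ _ hc]
          exact IHr _ _ _ (pvStackOK_tail hs) h1 h2
        · have hck : c ∈ pvKeys g := hs (c :: rest') (by simp) c (by simp)
          have hpos : 1 ≤ pvUncov g vis := pvUncov_pos g vis c hck hc
          match fuel1, fuel2 with
          | 0, _ => omega
          | _ + 1, 0 => omega
          | a + 1, b + 1 =>
            rw [pvRunB_push _ _ _ _ _ _ _ _ hc, pvRunB_push _ _ _ _ _ _ _ _ hc]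
            apply IH a (by omega) b
            · exact pvStackOK_push (pvStackOK_tail hs) (pvChildren_subset g hg c)
            · simp only [pvEnterB]
              have := pvUncov_add_lt g vis c hck hc
              omega
            · simp only [pvEnterB]
              have := pvUncov_add_lt g vis c hck hc
              omega

-- the bridge: one stack frame of the machine = A's child-loop over it, then backtrack
theorem pvBridge (g : List (String × List String))
    (hg : ∀ p ∈ g, ∀ c ∈ p.2, c ∈ pvKeys g) :
    ∀ (fuelB : Nat) (rest : List String) (frames : List (List String)) (path : List String)
      (paths : List (List String)) (vis : PySem.Set String) (fuelA : Nat),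
      (∀ c ∈ rest, c ∈ pvKeys g) → (∀ r ∈ frames, ∀ d ∈ r, d ∈ pvKeys g) →
      pvUncov g vis ≤ fuelB → pvUncov g vis ≤ fuelA →
      pvRunB g fuelB (rest :: frames) path paths vis =
        pvRunB g fuelB frames path.dropLast
          (pvLoopA g fuelA rest path (paths, vis)).1 (pvLoopA g fuelA rest path (paths, vis)).2 := by
  intro fuelB
  induction fuelB using Nat.strong_induction_on with
  | _ fuelB IH =>
    intro rest
    induction rest with
    | nil =>
      intro frames path paths vis fuelA _ _ _ _
      rw [pvRunB_pop, pvLoopA_nil]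
    | cons c rest' IHr =>
      intro frames path paths vis fuelA hr hf hB hA
      by_cases hc : c ∈ vis
      · rw [pvRunB_skip _ _ _ _ _ _ _ _ hc, pvLoopA_cons,
          if_pos ((PySem.Set.contains_iff vis c).mpr hc)]
        exact IHr frames path paths vis fuelA (fun d hd => hr d (List.mem_cons_of_mem _ hd)) hf hB hA
      · have hck : c ∈ pvKeys g := hr c (by simp)
        have hpos : 1 ≤ pvUncov g vis := pvUncov_pos g vis c hck hc
        have hadd : pvUncov g (vis.add c) < pvUncov g vis := pvUncov_add_lt g vis c hck hc
        match fuelB, fuelA with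
        | 0, _ => omega
        | _ + 1, 0 => omega
        | fB + 1, fA + 1 =>
          rw [pvRunB_push _ _ _ _ _ _ _ _ hc]
          have hkids : ∀ d ∈ (pvEnterB g c path paths vis).1, d ∈ pvKeys g :=
            pvChildren_subset g hg c
          have hrf : ∀ r ∈ rest' :: frames, ∀ d ∈ r, d ∈ pvKeys g := by
            intro r hrr d hd
            rcases List.mem_cons.mp hrr with h | h
            · exact hr d (List.mem_cons_of_mem _ (h ▸ hd))
            · exact hf r h d hd
          have hvise : (pvEnterB g c path paths vis).2.2.2 = vis.add c := rfl
          rw [IH fB (by omega) (pvEnterB g c path paths vis).1 (rest' :: frames)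
            (pvEnterB g c path paths vis).2.1 (pvEnterB g c path paths vis).2.2.1
            (pvEnterB g c path paths vis).2.2.2 fB hkids hrf
            (by rw [hvise]; omega) (by rw [hvise]; omega)]
          have hdrop : (pvEnterB g c path paths vis).2.1.dropLast = path := by
            show (path ++ [c]).dropLast = path
            exact List.dropLast_concat
          rw [hdrop]
          -- name the state after A has finished the subtree below c
          set S1 := pvLoopA g fB (pvEnterB g c path paths vis).1 (pvEnterB g c path paths vis).2.1
            ((pvEnterB g c path paths vis).2.2.1, (pvEnterB g c path paths vis).2.2.2) with hS1
          have hS1mono : ∀ x ∈ vis.add c, x ∈ S1.2 := by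
            intro x hx
            exact pvLoopA_vis_mono g fB _ _ _ x hx
          have hS1unc : pvUncov g S1.2 ≤ pvUncov g (vis.add c) := pvUncov_mono g _ _ hS1mono
          rw [IH fB (by omega) rest' frames path S1.1 S1.2 (fA + 1)
            (fun d hd => hr d (List.mem_cons_of_mem _ hd)) hf (by omega) (by omega)]
          -- rewrite the claimed right-hand side to the same term
          rw [pvLoopA_cons, if_neg (fun h => hc ((PySem.Set.contains_iff vis c).mp h))]
          rw [show pvDfsA g (fA + 1) c path paths vis = S1 by
            rw [pvDfsA_succ, hS1]
            exact pvLoopA_fuel_congr g hg fA fB _ _ _ hkids (by rw [hvise]; omega) (by rw [hvise]; omega)]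
          -- finally the outer fuel fB vs fB+1 on the remaining frames
          set T := pvLoopA g (fA + 1) rest' path S1 with hT
          have hTmono : ∀ x ∈ vis.add c, x ∈ T.2 := by
            intro x hx
            rw [hT, show S1 = (S1.1, S1.2) from rfl]
            exact pvLoopA_vis_mono g (fA + 1) _ _ _ x (hS1mono x hx)
          have hTunc : pvUncov g T.2 ≤ pvUncov g (vis.add c) := pvUncov_mono g _ _ hTmono
          rw [pvRunB_fuel_congr g hg fB (fB + 1) frames path.dropLast T.1 T.2 hf (by omega) (by omega)]

-- the two top-level folds agree step for step
theorem pvFold_eq (g : List (String × List String))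
    (hg : ∀ p ∈ g, ∀ c ∈ p.2, c ∈ pvKeys g) :
    ∀ (l : List (String × List String)) (st : List (List String) × PySem.Set String),
      l.foldl (fun st kv =>
        if PySem.Set.contains st.2 kv.1 then st
        else pvDfsA g (g.length + 1) kv.1 [] st.1 st.2) st =
      l.foldl (fun st kv =>
        if PySem.Set.contains st.2 kv.1 then st
        else
          let e := pvEnterB g kv.1 [] st.1 st.2
          pvRunB g (g.length + 1) [e.1] e.2.1 e.2.2.1 e.2.2.2) st := by
  intro l
  induction l with
  | nil => intro st; rfl
  | cons kv l ih =>
    intro st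
    rw [List.foldl_cons, List.foldl_cons, ← ih]
    congr 1
    by_cases hc : PySem.Set.contains st.2 kv.1 = true
    · rw [if_pos hc, if_pos hc]
    · rw [if_neg hc, if_neg hc]
      have hcm : kv.1 ∉ st.2 := fun hm => hc ((PySem.Set.contains_iff _ _).mpr hm)
      show pvDfsA g (g.length + 1) kv.1 [] st.1 st.2 =
        pvRunB g (g.length + 1) [(pvEnterB g kv.1 [] st.1 st.2).1]
          (pvEnterB g kv.1 [] st.1 st.2).2.1 (pvEnterB g kv.1 [] st.1 st.2).2.2.1
          (pvEnterB g kv.1 [] st.1 st.2).2.2.2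
      rw [pvBridge g hg (g.length + 1) (pvEnterB g kv.1 [] st.1 st.2).1 []
        (pvEnterB g kv.1 [] st.1 st.2).2.1 (pvEnterB g kv.1 [] st.1 st.2).2.2.1
        (pvEnterB g kv.1 [] st.1 st.2).2.2.2 g.length
        (pvChildren_subset g hg kv.1) (by simp)
        (le_trans (pvUncov_le_len g _) (by omega)) (pvUncov_le_len g _)]
      rw [pvRunB_nil, pvDfsA_succ]

-- ===== VERDICT (by name: the statement is the Claim_ definition above) =====
theorem review_sort_path_spec : Claim_equal_review_sort_path := by
  intro g _ hpre
  unfold Spec_review_sort_path review_sort_path review_sort_path_alt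
  rw [pvFold_eq g hpre.2]
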